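-- pv_equiv track=rewrite | github.com/Rubal0990/GFG-DSA | Total Cuts - GFG/total-cuts.py | totalCuts
-- ===== SOURCE A (Python) =====
-- from typing import List
--
-- def totalCuts(N : int, K : int, A : List[int]) -> int:
--     maxv, minv = [0]*N, [0]*N
--     maxv[0] = A[0]
--     for i in range(1, N):
--         maxv[i] = max(maxv[i-1], A[i])
--
--     minv[-1] = A[-1]
--     for i in range(-2, -N-1, -1):
--         minv[i] = min(minv[i+1], A[i])
--
--     return sum(1 for i in range(1, N) if maxv[i-1]+minv[i] >= K)
-- ===== SOURCE B (Python) =====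
-- from typing import List
--
-- def totalCuts(N: int, K: int, A: List[int]) -> int:
--     # max(A[:i]) and min(A[i-N:]) are both nondecreasing in i, so the valid cut
--     # positions form a suffix of 1..N-1: binary-search its left boundary.
--     if not 1 <= N <= len(A):
--         raise ValueError("N must be between 1 and len(A)")
--     lo, hi = 1, N
--     while lo < hi:
--         mid = (lo + hi) // 2
--         if max(A[:mid]) + min(A[mid - N:]) >= K:
--             hi = mid
--         else:
--             lo = mid + 1
--     return N - lo
-- ===== Notes on version B (the rewrite author's own statement) =====
-- stated objective: alternative
-- what changed: B replaces A's two auxiliary arrays and counting pass by a binary search: max(A[:i]) and min(A[i-N:]) are both nondecreasing in i, so the valid cut positions form a suffix of 1..N-1 and B bisects its left boundary with O(N) slice probes and returns N minus the boundary.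
import Mathlib
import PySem

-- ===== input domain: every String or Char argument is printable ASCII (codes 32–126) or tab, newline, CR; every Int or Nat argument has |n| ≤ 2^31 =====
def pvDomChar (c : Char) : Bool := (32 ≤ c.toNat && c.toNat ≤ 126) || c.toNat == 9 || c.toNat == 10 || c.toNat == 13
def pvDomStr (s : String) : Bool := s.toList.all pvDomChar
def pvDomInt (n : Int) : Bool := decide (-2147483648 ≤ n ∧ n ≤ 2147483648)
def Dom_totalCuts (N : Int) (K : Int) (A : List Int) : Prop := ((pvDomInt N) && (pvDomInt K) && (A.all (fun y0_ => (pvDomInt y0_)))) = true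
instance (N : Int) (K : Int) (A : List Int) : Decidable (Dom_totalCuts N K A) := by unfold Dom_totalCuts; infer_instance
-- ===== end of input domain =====

-- B replaces A's two auxiliary arrays and counting pass by a binary search: max(A[:i]) and
-- min(A[i-N:]) are both nondecreasing in i, so the valid cut positions form a suffix of 1..N-1
-- and B bisects its left boundary (alternative algorithm, not claimed faster).


-- ===== PORT A =====
-- literal transliteration: the two arrays are lists updated with pySetD, loops are foldl over pyRange;
-- pyGetD/pySetD defaults are never taken under Pre_ (all indices in range there).
def totalCuts (N : Int) (K : Int) (A : List Int) : Int :=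
  let maxv0 : List Int := PySem.List.pySetD (List.replicate N.toNat 0) 0 (PySem.List.pyGetD A 0 0)
  let maxv := (PySem.List.pyRange 1 N 1).foldl
    (fun mv i => PySem.List.pySetD mv i
      (max (PySem.List.pyGetD mv (i - 1) 0) (PySem.List.pyGetD A i 0))) maxv0
  let minv0 : List Int := PySem.List.pySetD (List.replicate N.toNat 0) (-1) (PySem.List.pyGetD A (-1) 0)
  let minv := (PySem.List.pyRange (-2) (-N - 1) (-1)).foldl
    (fun mv i => PySem.List.pySetD mv i
      (min (PySem.List.pyGetD mv (i + 1) 0) (PySem.List.pyGetD A i 0))) minv0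
  ((PySem.List.pyRange 1 N 1).map
    (fun i => if PySem.List.pyGetD maxv (i - 1) 0 + PySem.List.pyGetD minv i 0 ≥ K then (1 : Int) else 0)).sum

-- ===== PORT B =====
-- literal transliteration of Source B: 'max(A[:mid]) + min(A[mid-N:]) >= K' (the .getD 0 defaults are
-- never taken under Pre_: both slices are nonempty there), and the while loop as well-founded
-- recursion on hi - lo with Python's '//' as PySem.Int.floordiv. Source B's opening validation raises
-- ValueError exactly outside Pre_ (where A raises IndexError too); the port carries the returning branch.
def okCut (N : Int) (K : Int) (A : List Int) (mid : Int) : Bool :=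
  decide ((PySem.List.max? (PySem.List.slice A none (some mid)) (fun y => y)).getD 0
        + (PySem.List.min? (PySem.List.slice A (some (mid - N)) none) (fun y => y)).getD 0 ≥ K)

def bsCut (N : Int) (K : Int) (A : List Int) (lo hi : Int) : Int :=
  if h : lo < hi then
    let mid := PySem.Int.floordiv (lo + hi) 2
    if okCut N K A mid then bsCut N K A lo mid
    else bsCut N K A (mid + 1) hi
  else lo
termination_by (hi - lo).toNat
decreasing_by
  · have h2 : PySem.Int.floordiv (lo + hi) 2 < hi :=
      (PySem.Int.floordiv_lt_iff_lt_mul (by omega)).mpr (by omega)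
    omega
  · have h1 := (PySem.Int.floordiv_two_mid_bounds (le_of_lt h)).1
    omega

def totalCuts_alt (N : Int) (K : Int) (A : List Int) : Int :=
  N - bsCut N K A 1 N

-- ===== PRECONDITION & SPEC =====
-- exactly the inputs on which the Python A returns: it raises IndexError when N ≤ 0 (maxv[0] on an
-- empty array) or when len(A) < N (A[i] / A[-i] out of range).
def Pre_totalCuts (N : Int) (_K : Int) (A : List Int) : Prop := 1 ≤ N ∧ N ≤ (A.length : Int)
instance (N : Int) (K : Int) (A : List Int) : Decidable (Pre_totalCuts N K A) := by unfold Pre_totalCuts; infer_instance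
def pvWitness_totalCuts : Int × Int × List Int := (3, 4, [2, 5, 1])
def Spec_totalCuts (N : Int) (K : Int) (A : List Int) (out : Int) : Prop := out = totalCuts_alt N K A
instance (N : Int) (K : Int) (A : List Int) (out : Int) : Decidable (Spec_totalCuts N K A out) := by unfold Spec_totalCuts; infer_instance

-- ===== CLAIM (what is proved, stated in full; the proofs are below) =====
def Claim_equal_totalCuts : Prop := ∀ (N : Int) (K : Int) (A : List Int), Dom_totalCuts N K A → Pre_totalCuts N K A → Spec_totalCuts N K A (totalCuts N K A)

-- ===== LEMMAS AND PROOFS =====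

-- prefix-max scan: pmax a l = [max(a,l[0]), max(a,l[0],l[1]), …]
def pmax (a : Int) : List Int → List Int
  | [] => []
  | x :: xs => max a x :: pmax (max a x) xs

-- suffix-min list: smin l = [min(l[i:]) for i in range(len(l))]
def smin : List Int → List Int
  | [] => []
  | x :: xs => match smin xs with
    | [] => [x]
    | m :: ms => min x m :: m :: ms

-- max / min of a nonempty list as the fold Python's max()/min() compute (0 never used under Pre_)
def mfoldMax : List Int → Int
  | [] => 0
  | x :: xs => xs.foldl max x

def mfoldMin : List Int → Int
  | [] => 0
  | x :: xs => xs.foldl min x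

theorem length_pmax (a : Int) (l : List Int) : (pmax a l).length = l.length := by
  induction l generalizing a with
  | nil => rfl
  | cons x xs ih => simp [pmax, ih]

theorem length_smin (l : List Int) : (smin l).length = l.length := by
  induction l with
  | nil => rfl
  | cons x xs ih =>
    cases h : smin xs with
    | nil => rw [h] at ih; simp [smin, h]; simpa using ih.symm
    | cons m ms => rw [h] at ih; simp [smin, h]; simpa using ih

theorem smin_cons (x m : Int) (l ms : List Int) (h : smin l = m :: ms) :
    smin (x :: l) = min x m :: m :: ms := by
  simp only [smin, h]

theorem pmax_append (a : Int) (l : List Int) (x : Int) :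
    pmax a (l ++ [x]) = pmax a l ++ [max (l.foldl max a) x] := by
  induction l generalizing a with
  | nil => simp [pmax]
  | cons y ys ih => simp [pmax, ih, List.foldl_cons]

theorem getD_pmax_last (l : List Int) : ∀ a : Int, (a :: pmax a l).getD l.length 0 = l.foldl max a := by
  induction l with
  | nil => intro a; rfl
  | cons x xs ih =>
    intro a
    simp only [pmax, List.length_cons, List.getD_cons_succ, List.foldl_cons]
    exact ih (max a x)

-- getD of the prefix-max list at k is the max of the first k+1 elements
theorem getD_pmax (l : List Int) : ∀ (k : Nat) (a : Int), k ≤ l.length →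
    (a :: pmax a l).getD k 0 = (l.take k).foldl max a := by
  induction l with
  | nil =>
    intro k a hk
    have hk0 : k = 0 := by simpa using hk
    subst hk0; rfl
  | cons x xs ih =>
    intro k a hk
    cases k with
    | zero => rfl
    | succ k =>
      simp only [pmax, List.getD_cons_succ, List.take_succ_cons, List.foldl_cons]
      exact ih k (max a x) (by simpa using hk)

-- getD of the suffix-min list at k is the min of l.drop k
theorem getD_smin (l : List Int) : ∀ k : Nat, k < l.length →
    (smin l).getD k 0 = mfoldMin (l.drop k) := by
  induction l with
  | nil => intro k hk; simp at hk
  | cons x xs ih =>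
    intro k hk
    cases k with
    | zero =>
      cases hxs : xs with
      | nil => simp [smin, mfoldMin]
      | cons y ys =>
        subst hxs
        obtain ⟨m, ms, hs⟩ : ∃ m ms, smin (y :: ys) = m :: ms := by
          cases h : smin (y :: ys) with
          | nil => have := congrArg List.length h; rw [length_smin] at this; simp at this
          | cons m ms => exact ⟨m, ms, rfl⟩
        rw [smin_cons x m (y :: ys) ms hs]
        have hm := ih 0 (by simp)
        rw [hs] at hm
        simp only [List.getD_cons_zero, List.drop_zero, mfoldMin] at hm
        simp only [List.getD_cons_zero, List.drop_zero, mfoldMin, List.foldl_cons]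
        rw [List.foldl_assoc, ← hm]
    | succ k =>
      have hk' : k < xs.length := by simpa using hk
      obtain ⟨m, ms, hs⟩ : ∃ m ms, smin xs = m :: ms := by
        cases h : smin xs with
        | nil =>
          have := congrArg List.length h; rw [length_smin] at this
          simp only [List.length_nil] at this; omega
        | cons m ms => exact ⟨m, ms, rfl⟩
      rw [smin_cons x m xs ms hs, List.getD_cons_succ, ← hs, List.drop_succ_cons]
      exact ih k hk'

theorem pySetD_neg (xs : List Int) (k : Nat) (v : Int) (h1 : 0 < k) (h2 : k ≤ xs.length) :
    PySem.List.pySetD xs (-(k : Int)) v = xs.set (xs.length - k) v := by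
  unfold PySem.List.pySetD PySem.List.pySet? PySem.List.pyIdx?
  rw [if_neg (by omega), if_pos (by omega)]
  simp

-- invariant of A's forward maxv loop: after range(1, 1+j) the first j+1 cells hold the prefix maxima
theorem maxv_inv_gen (A : List Int) (a : Int) (rest : List Int)
    (htake : A.take (rest.length + 1) = a :: rest) (j : Nat) (hj : j ≤ rest.length) :
    (PySem.List.pyRange 1 (1 + (j : Int)) 1).foldl
      (fun mv i => PySem.List.pySetD mv i
        (max (PySem.List.pyGetD mv (i - 1) 0) (PySem.List.pyGetD A i 0)))
      (a :: List.replicate rest.length 0)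
    = (a :: pmax a (rest.take j)) ++ List.replicate (rest.length - j) 0 := by
  induction j with
  | zero =>
    rw [show (1 : Int) + ((0 : Nat) : Int) = 1 by norm_num, PySem.List.pyRange_one_eq_nil le_rfl]
    simp [pmax]
  | succ j ih =>
    have hj' : j < rest.length := by omega
    have hlen_take : (rest.take j).length = j := by simp; omega
    rw [show (1 + ((j + 1 : Nat) : Int)) = (1 + (j : Int)) + 1 by push_cast; ring,
      PySem.List.pyRange_one_succ_right (by omega), List.foldl_append, ih (by omega)]
    simp only [List.foldl_cons, List.foldl_nil]
    have hget1 : PySem.List.pyGetD ((a :: pmax a (rest.take j)) ++ List.replicate (rest.length - j) 0)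
        ((1 + (j : Int)) - 1) 0 = (rest.take j).foldl max a := by
      rw [show (1 + (j : Int)) - 1 = ((j : Nat) : Int) by ring, PySem.List.pyGetD_natCast,
        List.getD_append (a :: pmax a (rest.take j)) (List.replicate (rest.length - j) 0) 0 j
          (by rw [List.length_cons, length_pmax, hlen_take]; omega)]
      have := getD_pmax_last (rest.take j) a
      rwa [hlen_take] at this
    have hget2 : PySem.List.pyGetD A (1 + (j : Int)) 0 = rest.getD j 0 := by
      rw [show (1 : Int) + (j : Int) = ((j + 1 : Nat) : Int) by push_cast; ring,
        PySem.List.pyGetD_natCast]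
      rw [List.getD_eq_getElem?_getD, List.getD_eq_getElem?_getD,
        ← List.getElem?_take_of_lt (show j + 1 < rest.length + 1 by omega), htake,
        List.getElem?_cons_succ]
    rw [hget1, hget2,
      show (1 : Int) + (j : Int) = ((j + 1 : Nat) : Int) by push_cast; ring,
      PySem.List.pySetD_natCast]
    rw [List.set_append, if_neg (by simp [length_pmax, hlen_take]),
      show j + 1 - (a :: pmax a (rest.take j)).length = 0 by simp [length_pmax, hlen_take],
      show rest.length - j = (rest.length - (j + 1)) + 1 by omega,
      List.replicate_succ, List.set_cons_zero]
    rw [List.take_add_one, List.getElem?_eq_getElem hj']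
    simp only [Option.toList_some]
    rw [pmax_append, List.getD_eq_getElem rest 0 hj']
    simp

theorem maxv_inv (A : List Int) (a : Int) (rest : List Int)
    (htake : A.take (rest.length + 1) = a :: rest) :
    (PySem.List.pyRange 1 (1 + (rest.length : Int)) 1).foldl
      (fun mv i => PySem.List.pySetD mv i
        (max (PySem.List.pyGetD mv (i - 1) 0) (PySem.List.pyGetD A i 0)))
      (a :: List.replicate rest.length 0)
    = a :: pmax a rest := by
  simpa using maxv_inv_gen A a rest htake rest.length le_rfl

-- invariant of A's backward minv loop: after m steps the last m+1 cells of the length-n array hold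
-- the suffix minima of the last n elements of A
theorem minv_inv_gen (A : List Int) (n : Nat) (hn : 1 ≤ n) (hnA : n ≤ A.length)
    (m : Nat) (hm : m ≤ n - 1) :
    ((List.range m).map (fun k : Nat => (-2 : Int) - (k : Int))).foldl
      (fun mv i => PySem.List.pySetD mv i
        (min (PySem.List.pyGetD mv (i + 1) 0) (PySem.List.pyGetD A i 0)))
      (List.replicate (n - 1) 0 ++ smin ((A.drop (A.length - n)).drop (n - 1)))
    = List.replicate (n - 1 - m) 0 ++ smin ((A.drop (A.length - n)).drop (n - 1 - m)) := by
  have hLlen : (A.drop (A.length - n)).length = n := by simp; omega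
  induction m with
  | zero => simp
  | succ m ih =>
    have hm' : m + 1 ≤ n - 1 := hm
    have hq : n - 1 - (m + 1) < n := by omega
    set q : Nat := n - 1 - (m + 1) with hqdef
    obtain ⟨m', ms', hsd⟩ : ∃ m' ms', smin ((A.drop (A.length - n)).drop (q + 1)) = m' :: ms' := by
      cases hd : smin ((A.drop (A.length - n)).drop (q + 1)) with
      | nil =>
        have := congrArg List.length hd
        rw [length_smin] at this
        simp at this
        omega
      | cons m' ms' => exact ⟨m', ms', rfl⟩
    rw [List.range_succ]
    simp only [List.map_append, List.map_cons, List.map_nil, List.foldl_append,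
      List.foldl_cons, List.foldl_nil]
    rw [ih (by omega)]
    have e1 : n - 1 - m = q + 1 := by omega
    rw [e1]
    have hget1 : PySem.List.pyGetD
        (List.replicate (q + 1) (0 : Int) ++ smin ((A.drop (A.length - n)).drop (q + 1)))
        ((-2 : Int) - (m : Int) + 1) 0 = m' := by
      rw [show (-2 : Int) - (m : Int) + 1 = -((m + 1 : Nat) : Int) by push_cast; ring,
        PySem.List.pyGetD_neg_natCast _ _ _ (by omega) (by simp [length_smin]; omega)]
      simp only [show (List.replicate (q + 1) (0 : Int) ++ smin ((A.drop (A.length - n)).drop (q + 1))).length - (m + 1) = q + 1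
        from by simp [length_smin]; omega]
      rw [List.getElem_append_right (by simp)]
      simp only [List.length_replicate, Nat.sub_self, hsd, List.getElem_cons_zero]
    have hq' : q < (A.drop (A.length - n)).length := by rw [hLlen]; omega
    have hget2 : PySem.List.pyGetD A ((-2 : Int) - (m : Int)) 0 = (A.drop (A.length - n))[q]'hq' := by
      rw [show (-2 : Int) - (m : Int) = -((m + 2 : Nat) : Int) by push_cast; ring,
        PySem.List.pyGetD_neg_natCast _ _ _ (by omega) (by omega)]
      rw [List.getElem_drop]
      congr 1
      omega
    rw [hget1, hget2,
      show (-2 : Int) - (m : Int) = -((m + 2 : Nat) : Int) by push_cast; ring,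
      pySetD_neg _ _ _ (by omega) (by simp [length_smin]; omega),
      show (List.replicate (q + 1) (0 : Int) ++ smin ((A.drop (A.length - n)).drop (q + 1))).length - (m + 2) = q
        from by simp [length_smin]; omega]
    rw [List.set_append, if_pos (by simp),
      show List.replicate (q + 1) (0 : Int) = List.replicate q 0 ++ [0] by rw [List.replicate_succ'],
      List.set_append, if_neg (by simp),
      show q - (List.replicate q (0 : Int)).length = 0 by simp, List.set_cons_zero]
    rw [List.append_assoc, List.singleton_append]
    congr 1
    rw [List.drop_eq_getElem_cons hq', smin_cons _ m' _ ms' hsd, hsd, min_comm]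

-- B's probe at a cut position i (1 ≤ i < N, N ≤ len A): max of the first i elements plus
-- min of the last N - i elements
theorem okCut_eq (N K : Int) (A : List Int) (n : Nat) (hN : N = (n : Int))
    (hnA : n ≤ A.length) (i : Int) (h1 : 1 ≤ i) (h2 : i < N) :
    okCut N K A i
    = decide (mfoldMax (A.take i.toNat) + mfoldMin (A.drop (A.length - (n - i.toNat))) ≥ K) := by
  have hi : i.toNat < n := by omega
  have hAne : A.length ≠ 0 := by omega
  unfold okCut
  rw [PySem.List.slice_to A (by omega),
    show i - N = -(((n - i.toNat : Nat) : Int)) by omega,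
    PySem.List.slice_from_neg_natCast A (n - i.toNat) (by omega)]
  obtain ⟨x, xs, hT⟩ : ∃ x xs, A.take i.toNat = x :: xs := by
    cases h : A.take i.toNat with
    | nil => have := congrArg List.length h; rw [List.length_take] at this; simp only [List.length_nil] at this; omega
    | cons x xs => exact ⟨x, xs, rfl⟩
  obtain ⟨y, ys, hD⟩ : ∃ y ys, A.drop (A.length - (n - i.toNat)) = y :: ys := by
    cases h : A.drop (A.length - (n - i.toNat)) with
    | nil =>
      have := congrArg List.length h
      rw [List.length_drop] at this
      simp only [List.length_nil] at this
      omega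
    | cons y ys => exact ⟨y, ys, rfl⟩
  rw [hT, hD, PySem.List.max?_id_cons, PySem.List.min?_id_cons]
  simp only [Option.getD_some, mfoldMax, mfoldMin]
  rfl

-- the probe is monotone in the cut position
theorem okCut_step (N K : Int) (A : List Int) (n : Nat) (hN : N = (n : Int))
    (hnA : n ≤ A.length) (i : Int) (h1 : 1 ≤ i) (h2 : i + 1 < N)
    (h : okCut N K A i = true) : okCut N K A (i + 1) = true := by
  rw [okCut_eq N K A n hN hnA i h1 (by omega)] at h
  rw [okCut_eq N K A n hN hnA (i + 1) (by omega) h2]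
  rw [decide_eq_true_iff] at h ⊢
  have hi1 : 1 ≤ i.toNat := by omega
  have hi2 : i.toNat + 1 < n := by omega
  have e1 : (i + 1).toNat = i.toNat + 1 := by omega
  rw [e1]
  have hmax : mfoldMax (A.take i.toNat) ≤ mfoldMax (A.take (i.toNat + 1)) := by
    obtain ⟨x, xs, hT⟩ : ∃ x xs, A.take i.toNat = x :: xs := by
      cases h : A.take i.toNat with
      | nil => have := congrArg List.length h; rw [List.length_take] at this; simp only [List.length_nil] at this; omega
      | cons x xs => exact ⟨x, xs, rfl⟩
    have hilen : i.toNat < A.length := by omega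
    rw [List.take_add_one, List.getElem?_eq_getElem hilen]
    simp only [Option.toList_some, hT, List.cons_append, mfoldMax, List.foldl_append,
      List.foldl_cons, List.foldl_nil]
    exact le_max_left _ _
  have hmin : mfoldMin (A.drop (A.length - (n - i.toNat)))
      ≤ mfoldMin (A.drop (A.length - (n - (i.toNat + 1)))) := by
    have hd : A.length - (n - (i.toNat + 1)) = (A.length - (n - i.toNat)) + 1 := by omega
    have hlt : A.length - (n - i.toNat) < A.length := by omega
    rw [hd, List.drop_eq_getElem_cons hlt]
    obtain ⟨y, ys, hD⟩ : ∃ y ys, A.drop (A.length - (n - i.toNat) + 1) = y :: ys := by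
      cases h : A.drop (A.length - (n - i.toNat) + 1) with
      | nil => have := congrArg List.length h; rw [List.length_drop] at this; simp only [List.length_nil] at this; omega
      | cons y ys => exact ⟨y, ys, rfl⟩
    rw [hD]
    simp only [mfoldMin, List.foldl_cons]
    rw [List.foldl_assoc]
    exact min_le_right _ _
  omega

theorem okCut_mono (N K : Int) (A : List Int) (n : Nat) (hN : N = (n : Int))
    (hnA : n ≤ A.length) (i : Int) (h1 : 1 ≤ i) (hci : okCut N K A i = true) :
    ∀ (j : Int), i ≤ j → j < N → okCut N K A j = true := by
  intro j hij hjN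
  induction j, hij using Int.le_induction with
  | base => exact hci
  | succ j hij ih =>
    exact okCut_step N K A n hN hnA j (by omega) (by omega) (ih (by omega))

-- binary-search invariant: bsCut returns the least valid cut in [lo, hi), else hi
theorem bsCut_inv (N K : Int) (A : List Int) (n : Nat) (hN : N = (n : Int)) (hnA : n ≤ A.length) :
    ∀ (lo hi : Int), 1 ≤ lo → lo ≤ hi → hi ≤ N →
    (∀ j, 1 ≤ j → j < lo → okCut N K A j = false) → (hi < N → okCut N K A hi = true) →
    (1 ≤ bsCut N K A lo hi ∧ bsCut N K A lo hi ≤ N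
     ∧ (∀ j, 1 ≤ j → j < bsCut N K A lo hi → okCut N K A j = false)
     ∧ (bsCut N K A lo hi < N → okCut N K A (bsCut N K A lo hi) = true)) := by
  intro lo hi
  induction lo, hi using bsCut.induct N K A with
  | case1 lo hi h mid hok ih =>
    intro hlo hlohi hhiN hbelow habove
    have hmid1 := (PySem.Int.floordiv_two_mid_bounds (le_of_lt h)).1
    have hmid2 : mid < hi := (PySem.Int.floordiv_lt_iff_lt_mul (by omega)).mpr (by omega)
    rw [bsCut, dif_pos h, if_pos hok]
    exact ih hlo (by omega) (by omega) hbelow (fun _ => hok)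
  | case2 lo hi h mid hok ih =>
    intro hlo hlohi hhiN hbelow habove
    have hmid1 := (PySem.Int.floordiv_two_mid_bounds (le_of_lt h)).1
    have hmid2 : mid < hi := (PySem.Int.floordiv_lt_iff_lt_mul (by omega)).mpr (by omega)
    rw [bsCut, dif_pos h, if_neg hok]
    refine ih (by omega) (by omega) (by omega) ?_ habove
    intro j hj1 hj2
    by_cases hjlo : j < lo
    · exact hbelow j hj1 hjlo
    · by_contra hc
      have hcj : okCut N K A j = true := by
        cases hcj : okCut N K A j with
        | false => exact absurd hcj hc
        | true => rfl
      have := okCut_mono N K A n hN hnA j hj1 hcj mid (by omega) (by omega)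
      rw [this] at hok
      exact hok rfl
  | case3 lo hi h =>
    intro hlo hlohi hhiN hbelow habove
    have heq : lo = hi := by omega
    subst heq
    rw [bsCut, dif_neg h]
    exact ⟨hlo, by omega, hbelow, habove⟩

-- 0/1 sum of a threshold indicator over range m
theorem sum_threshold (m t : Nat) (ht : t ≤ m) :
    ((List.range m).map (fun k => if t ≤ k then (1 : Int) else 0)).sum = ((m - t : Nat) : Int) := by
  induction m with
  | zero => simp
  | succ m ih =>
    rw [List.range_succ, List.map_append, List.sum_append]
    by_cases hm : t ≤ m
    · rw [ih hm]
      simp only [List.map_cons, List.map_nil, List.sum_cons, List.sum_nil, if_pos hm]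
      push_cast [Nat.sub_add_comm hm]
      ring
    · have : t = m + 1 := by omega
      subst this
      simp only [List.map_cons, List.map_nil, List.sum_cons, List.sum_nil,
        if_neg (by omega : ¬ m + 1 ≤ m), Nat.sub_self]
      rw [show ((List.range m).map (fun k => if m + 1 ≤ k then (1 : Int) else 0))
          = (List.range m).map (fun _ => (0 : Int)) from
        List.map_congr_left (fun k hk => by rw [List.mem_range] at hk; rw [if_neg (by omega)])]
      simp

theorem totalCuts_eq (N K : Int) (A : List Int) (hN1 : 1 ≤ N) (hlen : N ≤ (A.length : Int)) :
    totalCuts N K A = totalCuts_alt N K A := by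
  obtain ⟨n, rfl⟩ : ∃ n : Nat, N = (n : Int) := ⟨N.toNat, by omega⟩
  have hn1 : 1 ≤ n := by omega
  have hnA : n ≤ A.length := by exact_mod_cast hlen
  have hA : A ≠ [] := by intro hc; subst hc; simp at hnA; omega
  obtain ⟨a, restF, hF⟩ : ∃ a r, A.take n = a :: r := by
    cases hT : A.take n with
    | nil =>
      have := congrArg List.length hT
      simp only [List.length_take, List.length_nil] at this
      omega
    | cons a r => exact ⟨a, r, rfl⟩
  have hrF : restF.length = n - 1 := by
    have := congrArg List.length hF
    rw [List.length_take] at this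
    simp at this
    omega
  have hLlen : (A.drop (A.length - n)).length = n := by simp; omega
  have ha : A.getD 0 0 = a := by
    rw [List.getD_eq_getElem?_getD, ← List.getElem?_take_of_lt (show 0 < n by omega), hF]
    rfl
  unfold totalCuts
  simp only []
  -- maxv0
  have hmv0 : PySem.List.pySetD (List.replicate ((n : Int)).toNat 0) 0 (PySem.List.pyGetD A 0 0)
      = a :: List.replicate restF.length 0 := by
    rw [PySem.List.pyGetD_zero, ha,
      show ((n : Int)).toNat = restF.length + 1 by omega, List.replicate_succ]
    simp [PySem.List.pySetD_of_nonneg]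
  rw [hmv0,
    show (n : Int) = 1 + (restF.length : Int) by omega,
    maxv_inv A a restF (by rw [show restF.length + 1 = n by omega]; exact hF)]
  -- minv0
  have hinit : PySem.List.pySetD (List.replicate ((1 : Int) + (restF.length : Int)).toNat 0) (-1)
        (PySem.List.pyGetD A (-1) 0)
      = List.replicate (n - 1) 0 ++ smin ((A.drop (A.length - n)).drop (n - 1)) := by
    rw [PySem.List.pyGetD_neg_one A 0 hA,
      show ((1 : Int) + (restF.length : Int)).toNat = n by omega,
      show (-1 : Int) = -((1 : Nat) : Int) by norm_num,
      pySetD_neg _ _ _ (by omega) (by simp; omega),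
      show List.replicate n (0 : Int) = List.replicate (n - 1) 0 ++ [0] by
        rw [← List.replicate_succ']; congr 1; omega,
      List.set_append, if_neg (by simp)]
    rw [List.drop_drop, show (A.length - n) + (n - 1) = A.length - 1 by omega,
      List.drop_length_sub_one hA]
    simp [smin]
  rw [hinit]
  -- minv fold
  rw [PySem.List.pyRange_neg_one,
    show ((-2 : Int) - (-(1 + (restF.length : Int)) - 1)).toNat = n - 1 by omega,
    minv_inv_gen A n hn1 hnA (n - 1) le_rfl]
  simp only [Nat.sub_self, List.replicate_zero, List.nil_append, List.drop_zero]
  -- the counting sum over range(1, N): each term is B's probe okCut at cut 1+k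
  rw [PySem.List.pyRange_one 1 (1 + (restF.length : Int)),
    show ((1 : Int) + (restF.length : Int) - 1).toNat = restF.length by omega,
    List.map_map]
  have hterm : ∀ k ∈ List.range restF.length,
      ((fun i => if PySem.List.pyGetD (a :: pmax a restF) (i - 1) 0
          + PySem.List.pyGetD (smin (A.drop (A.length - n))) i 0 ≥ K then (1 : Int) else 0) ∘ fun k : Nat => 1 + (k : Int)) k
      = (fun k : Nat => if okCut (n : Int) K A (1 + (k : Int)) = true then (1 : Int) else 0) k := by
    intro k hk
    rw [List.mem_range] at hk
    have hk1 : k + 1 < n := by omega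
    simp only [Function.comp_apply, add_sub_cancel_left]
    rw [show (1 : Int) + (k : Int) = ((k + 1 : Nat) : Int) by push_cast; ring,
      PySem.List.pyGetD_natCast, PySem.List.pyGetD_natCast,
      okCut_eq (n : Int) K A n rfl hnA ((k + 1 : Nat) : Int) (by omega) (by exact_mod_cast hk1)]
    have e1 : (((k + 1 : Nat) : Int)).toNat = k + 1 := by omega
    rw [e1]
    have hmax : (a :: pmax a restF).getD k 0 = mfoldMax (A.take (k + 1)) := by
      rw [getD_pmax restF k a (by omega)]
      have : A.take (k + 1) = a :: restF.take k := by
        rw [show A.take (k + 1) = (A.take n).take (k + 1) by rw [List.take_take]; congr 1; omega,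
          hF, List.take_succ_cons]
      rw [this]
      rfl
    have hmin : (smin (A.drop (A.length - n))).getD (k + 1) 0
        = mfoldMin (A.drop (A.length - (n - (k + 1)))) := by
      rw [getD_smin (A.drop (A.length - n)) (k + 1) (by omega)]
      rw [List.drop_drop]
      congr 2
      omega
    rw [hmax, hmin]
    simp only [ge_iff_le, decide_eq_true_eq]
  rw [List.map_congr_left hterm]
  -- B's side: the binary search returns the least valid cut r in [1, N], and the sum counts N - r
  obtain ⟨hr1, hrN, hbelow, habove⟩ :=
    bsCut_inv (n : Int) K A n rfl hnA 1 (n : Int) le_rfl (by omega) le_rfl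
      (fun j hj1 hj2 => absurd hj1 (by omega)) (fun h => absurd h (by omega))
  set r := bsCut (n : Int) K A 1 (n : Int) with hrdef
  have hterm2 : ∀ k ∈ List.range restF.length,
      (fun k : Nat => if okCut (n : Int) K A (1 + (k : Int)) = true then (1 : Int) else 0) k
      = (fun k : Nat => if r.toNat - 1 ≤ k then (1 : Int) else 0) k := by
    intro k hk
    rw [List.mem_range] at hk
    show (if okCut ((n : Nat) : Int) K A (1 + (k : Int)) = true then (1 : Int) else 0)
        = (if r.toNat - 1 ≤ k then (1 : Int) else 0)
    by_cases hkr : r.toNat - 1 ≤ k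
    · have hrlt : r < (n : Int) := by omega
      rw [if_pos hkr,
        okCut_mono (n : Int) K A n rfl hnA r hr1 (habove hrlt) (1 + (k : Int)) (by omega)
          (by omega)]
      simp
    · rw [if_neg hkr, hbelow (1 + (k : Int)) (by omega) (by omega)]
      simp
  rw [List.map_congr_left hterm2, sum_threshold restF.length (r.toNat - 1) (by omega)]
  unfold totalCuts_alt
  rw [show (1 : Int) + (restF.length : Int) = (n : Int) by omega, ← hrdef]
  omega

-- ===== VERDICT (by name: the statement is the Claim_ definition above) =====
theorem totalCuts_spec : Claim_equal_totalCuts := by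
  intro N K A _ hPre
  unfold Spec_totalCuts
  exact totalCuts_eq N K A hPre.1 hPre.2
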